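-- pv_equiv track=rewrite | github.com/alessandropacielli/deepcomedy | nlgpoetry/hyphenation.py | hyps2verses
-- ===== SOURCE A (Python) =====
-- def hyps2verses(ids, eos, eot):
--     """
--     Split the list of hypens in different lists, separated
--     by the sep token.
--     :param ids: a list of hyphen' ids
--     :param eos: the separator token (INT) (id corresponding to <EOS>)
--     :return: a list of verses, each verse is a list of syllables
--     """
--
--     verses = [[]]
--     for id in ids:
--         if id == eot:
--             break
--         elif id == eos:
--             verses.append([])
--         else:
--             verses[-1].append(id)
--
--     if len(verses[-1]) < 1:
--         verses = verses[:-1]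
--
--     return verses
-- ===== SOURCE B (Python) =====
-- def hyps2verses(ids, eos, eot):
--     cut = len(ids)
--     for i, x in enumerate(ids):
--         if x == eot:
--             cut = i
--             break
--     seq = ids[:cut]
--     bounds = [-1] + [i for i, x in enumerate(seq) if x == eos] + [len(seq)]
--     verses = [seq[a + 1:b] for a, b in zip(bounds, bounds[1:])]
--     if not verses[-1]:
--         verses.pop()
--     return verses
-- ===== Notes on version B (the rewrite author's own statement) =====
-- stated objective: alternative
-- what changed: Replaces A's stateful loop that appends into a sentinel last-verse list with a decomposition that first cuts at the first eot, then collects the eos separator indices and rebuilds the verses by slicing between consecutive boundaries.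
import Mathlib
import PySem

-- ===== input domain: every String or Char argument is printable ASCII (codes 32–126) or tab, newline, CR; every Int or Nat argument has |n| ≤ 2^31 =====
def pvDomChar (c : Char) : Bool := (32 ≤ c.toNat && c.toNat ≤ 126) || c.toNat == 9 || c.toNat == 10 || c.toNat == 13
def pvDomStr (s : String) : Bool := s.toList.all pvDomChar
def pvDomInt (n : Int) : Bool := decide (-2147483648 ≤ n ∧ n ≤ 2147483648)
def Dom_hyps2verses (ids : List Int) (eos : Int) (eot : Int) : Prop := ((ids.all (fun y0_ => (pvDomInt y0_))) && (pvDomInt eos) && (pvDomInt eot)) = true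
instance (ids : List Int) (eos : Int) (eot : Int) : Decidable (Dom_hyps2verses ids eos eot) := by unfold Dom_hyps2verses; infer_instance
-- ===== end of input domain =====

-- B replaces A's stateful sentinel-append loop by an index-of-separators + slicing decomposition (objective: alternative; same O(n) cost).

-- ===== PORT A =====
-- verses[-1].append(id): append x to the last inner list (verses is never empty in A).
def pvAppendLast : List (List Int) → Int → List (List Int)
  | [], _ => []
  | [v], x => [v ++ [x]]
  | v :: vs, x => v :: pvAppendLast vs x

-- the for-loop of A (break on eot), state = verses
def pvLoopA (eos : Int) (eot : Int) : List Int → List (List Int) → List (List Int)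
  | [], vs => vs
  | x :: xs, vs =>
    if x = eot then vs
    else if x = eos then pvLoopA eos eot xs (vs ++ [[]])
    else pvLoopA eos eot xs (pvAppendLast vs x)

def hyps2verses (ids : List Int) (eos : Int) (eot : Int) : List (List Int) :=
  let verses := pvLoopA eos eot ids [[]]
  if (verses.getLastD []).length < 1 then verses.dropLast else verses

-- ===== PORT B =====
-- the first for-loop of B: index of the first eot, len(ids) if absent
def pvCutIdx (eot : Int) : List Int → Nat
  | [] => 0
  | x :: xs => if x = eot then 0 else pvCutIdx eot xs + 1

def hyps2verses_alt (ids : List Int) (eos : Int) (eot : Int) : List (List Int) :=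
  let cut := pvCutIdx eot ids
  let seq := PySem.List.slice ids (some 0) (some (cut : Int))          -- ids[:cut]
  let bounds : List Int :=
    -1 :: ((PySem.List.enumerate seq 0).filterMap
             (fun p => if p.2 = eos then some p.1 else none) ++ [(seq.length : Int)])
  let verses := (bounds.zip bounds.tail).map
                  (fun p => PySem.List.slice seq (some (p.1 + 1)) (some p.2))
  if verses.getLastD [] = [] then verses.dropLast else verses

-- ===== PRECONDITION & SPEC =====
def Spec_hyps2verses (ids : List Int) (eos : Int) (eot : Int) (out : List (List Int)) : Prop := out = hyps2verses_alt ids eos eot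
instance (ids : List Int) (eos : Int) (eot : Int) (out : List (List Int)) : Decidable (Spec_hyps2verses ids eos eot out) := by unfold Spec_hyps2verses; infer_instance

-- ===== CLAIM (what is proved, stated in full; the proofs are below) =====
def Claim_equal_hyps2verses : Prop := ∀ (ids : List Int) (eos : Int) (eot : Int), Dom_hyps2verses ids eos eot → Spec_hyps2verses ids eos eot (hyps2verses ids eos eot)

-- ===== LEMMAS AND PROOFS =====

-- the common normal form: split on eos, keeping empties
def pvConsHead (x : Int) : List (List Int) → List (List Int)
  | [] => [[x]]
  | p :: ps => (x :: p) :: ps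

def pvSplitE (eos : Int) : List Int → List (List Int)
  | [] => [[]]
  | x :: xs => if x = eos then [] :: pvSplitE eos xs else pvConsHead x (pvSplitE eos xs)

-- the common trailing-empty trim (A tests len < 1, B tests emptiness)
def pvTrimA (vs : List (List Int)) : List (List Int) :=
  if (vs.getLastD []).length < 1 then vs.dropLast else vs

def pvTrimB (vs : List (List Int)) : List (List Int) :=
  if vs.getLastD [] = [] then vs.dropLast else vs

lemma pvTrimA_eq_pvTrimB (vs : List (List Int)) : pvTrimA vs = pvTrimB vs := by
  unfold pvTrimA pvTrimB
  by_cases h : vs.getLastD [] = []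
  · rw [if_pos h, if_pos (by rw [h]; simp)]
  · rw [if_neg h, if_neg (fun hl => h (List.length_eq_zero_iff.mp (Nat.lt_one_iff.mp hl)))]

lemma pvSplitE_ne_nil (eos : Int) (xs : List Int) : pvSplitE eos xs ≠ [] := by
  cases xs with
  | nil => simp [pvSplitE]
  | cons x xs =>
    simp only [pvSplitE]
    split
    · simp
    · cases h : pvSplitE eos xs <;> simp [pvConsHead]

def pvGlue (last : List Int) : List (List Int) → List (List Int)
  | [] => [last]
  | p :: ps => (last ++ p) :: ps

lemma pvGlue_nil_of_ne_nil (ps : List (List Int)) (h : ps ≠ []) : pvGlue [] ps = ps := by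
  cases ps with
  | nil => exact absurd rfl h
  | cons p ps => simp [pvGlue]

lemma pvGlue_consHead (last : List Int) (x : Int) (ps : List (List Int)) :
    pvGlue last (pvConsHead x ps) = pvGlue (last ++ [x]) ps := by
  cases ps <;> simp [pvConsHead, pvGlue]

lemma pvAppendLast_cons (v : List Int) (l : List (List Int)) (x : Int) (h : l ≠ []) :
    pvAppendLast (v :: l) x = v :: pvAppendLast l x := by
  cases l with
  | nil => exact absurd rfl h
  | cons w ws => rfl

lemma pvAppendLast_append (pre : List (List Int)) (last : List Int) (x : Int) :
    pvAppendLast (pre ++ [last]) x = pre ++ [last ++ [x]] := by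
  induction pre with
  | nil => rfl
  | cons v vs ih =>
    rw [List.cons_append, pvAppendLast_cons v _ x (by simp), ih, List.cons_append]

lemma pvLoopA_eq (eos eot : Int) (ids : List Int) :
    ∀ (pre : List (List Int)) (last : List Int),
      pvLoopA eos eot ids (pre ++ [last]) =
        pre ++ pvGlue last (pvSplitE eos (ids.takeWhile (fun x => x != eot))) := by
  induction ids with
  | nil => intro pre last; simp [pvLoopA, pvSplitE, pvGlue]
  | cons x xs ih =>
    intro pre last
    by_cases hx : x = eot
    · rw [List.takeWhile_cons_of_neg (by simp [hx])]
      simp [pvLoopA, hx, pvSplitE, pvGlue]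
    · rw [List.takeWhile_cons_of_pos (by simp [hx])]
      by_cases hs : x = eos
      · simp only [pvLoopA, if_neg hx, if_pos hs, pvSplitE]
        rw [show pre ++ [last] ++ [[]] = (pre ++ [last]) ++ [([] : List Int)] by simp,
          ih (pre ++ [last]) [],
          pvGlue_nil_of_ne_nil _ (pvSplitE_ne_nil eos _)]
        cases h : pvSplitE eos (xs.takeWhile (fun x => x != eot)) with
        | nil => exact absurd h (pvSplitE_ne_nil eos _)
        | cons p ps => simp [pvGlue]
      · simp only [pvLoopA, if_neg hx, if_neg hs, pvSplitE]
        rw [pvAppendLast_append, ih pre (last ++ [x]), pvGlue_consHead]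

lemma hyps2verses_char (ids : List Int) (eos eot : Int) :
    hyps2verses ids eos eot = pvTrimA (pvSplitE eos (ids.takeWhile (fun x => x != eot))) := by
  have h := pvLoopA_eq eos eot ids [] []
  simp only [List.nil_append] at h
  rw [pvGlue_nil_of_ne_nil _ (pvSplitE_ne_nil eos _)] at h
  simp [hyps2verses, h, pvTrimA]

-- B-side: the cut index yields the takeWhile prefix
lemma take_pvCutIdx (eot : Int) (ids : List Int) :
    ids.take (pvCutIdx eot ids) = ids.takeWhile (fun x => x != eot) := by
  induction ids with
  | nil => simp [pvCutIdx]
  | cons x xs ih =>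
    by_cases hx : x = eot
    · simp [pvCutIdx, hx]
    · simp [pvCutIdx, hx, ih]

-- eos positions, as natural numbers
def pvPosN (eos : Int) : List Int → List Nat
  | [] => []
  | x :: xs => if x = eos then 0 :: (pvPosN eos xs).map (· + 1) else (pvPosN eos xs).map (· + 1)

-- enumerate/filterMap computes those positions (shifted by the start)
lemma enum_filterMap_eq (eos : Int) (seq : List Int) : ∀ (s : Int),
    (PySem.List.enumerate seq s).filterMap (fun p => if p.2 = eos then some p.1 else none)
      = (pvPosN eos seq).map (fun k : Nat => s + (k : Int)) := by
  induction seq with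
  | nil => intro s; simp [PySem.List.enumerate_nil, pvPosN]
  | cons x xs ih =>
    intro s
    have hshift : ∀ ps : List Nat,
        (ps.map (· + 1)).map (fun k : Nat => s + (k : Int)) = ps.map (fun k : Nat => (s + 1) + (k : Int)) := by
      intro ps
      rw [List.map_map]
      exact List.map_congr_left (fun k _ => by simp [Function.comp]; ring)
    rw [PySem.List.enumerate_cons, List.filterMap_cons]
    by_cases hx : x = eos
    · simp only [hx, pvPosN, ih (s + 1), hshift, if_true, List.map_cons, Nat.cast_zero, add_zero]
    · simp only [pvPosN, if_neg hx, ih (s + 1), hshift]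

-- segments of seq delimited by positions, starting at prev
def pvSegs (seq : List Int) : List Nat → Nat → List (List Int)
  | [], prev => [seq.drop prev]
  | b :: bs, prev => (seq.drop prev).take (b - prev) :: pvSegs seq bs (b + 1)

-- the zipped-slices expression computes pvSegs
lemma pairs_slice_eq_segs (seq : List Int) : ∀ (ps : List Nat) (prev : Nat),
    ((((((prev : Int) - 1)) :: (ps.map (fun k : Nat => (k : Int)) ++ [(seq.length : Int)])).zip
        (ps.map (fun k : Nat => (k : Int)) ++ [(seq.length : Int)])).map
      (fun p => PySem.List.slice seq (some (p.1 + 1)) (some p.2)))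
      = pvSegs seq ps prev := by
  intro ps
  induction ps with
  | nil =>
    intro prev
    simp only [List.map_nil, List.nil_append, List.zip_cons_cons, List.zip_nil_right,
      List.map_cons, List.map_nil, pvSegs]
    rw [show ((prev : Int) - 1 + 1) = ((prev : Nat) : Int) by ring, PySem.List.slice_natCast]
    congr 1
    exact List.take_of_length_le (by simp)
  | cons b bs ih =>
    intro prev
    simp only [List.map_cons, List.cons_append, List.zip_cons_cons, List.map_cons, pvSegs]
    congr 1
    · rw [show ((prev : Int) - 1 + 1) = ((prev : Nat) : Int) by ring, PySem.List.slice_natCast]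
    · rw [show ((b : Nat) : Int) = (((b + 1 : Nat)) : Int) - 1 by push_cast; ring]
      exact ih (b + 1)

-- shifting: segments of (x :: seq) with all positions shifted up by one
lemma pvSegs_shift (x : Int) (seq : List Int) : ∀ (bs : List Nat) (prev : Nat),
    pvSegs (x :: seq) (bs.map (· + 1)) (prev + 1) = pvSegs seq bs prev := by
  intro bs
  induction bs with
  | nil => intro prev; simp [pvSegs]
  | cons b bs ih =>
    intro prev
    simp only [List.map_cons, pvSegs, List.drop_succ_cons, List.cons.injEq]
    exact ⟨by simp, ih (b + 1)⟩

lemma pvSegs_cons (x : Int) (seq : List Int) (bs : List Nat) :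
    pvSegs (x :: seq) (bs.map (· + 1)) 0 = pvConsHead x (pvSegs seq bs 0) := by
  cases bs with
  | nil => simp [pvSegs, pvConsHead]
  | cons b bs =>
    simp only [List.map_cons, pvSegs, List.drop_zero, Nat.sub_zero,
      List.take_succ_cons, pvConsHead, List.cons.injEq]
    exact ⟨trivial, pvSegs_shift x seq bs (b + 1)⟩

lemma segs_eq_splitE (eos : Int) (seq : List Int) :
    pvSegs seq (pvPosN eos seq) 0 = pvSplitE eos seq := by
  induction seq with
  | nil => simp [pvSegs, pvPosN, pvSplitE]
  | cons x xs ih =>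
    by_cases hx : x = eos
    · simp only [pvPosN, if_pos hx, pvSplitE, pvSegs, List.drop_zero, List.take_zero,
        Nat.sub_zero, List.cons.injEq]
      exact ⟨trivial, by rw [pvSegs_shift x xs (pvPosN eos xs) 0]; exact ih⟩
    · simp only [pvPosN, pvSplitE, if_neg hx]
      rw [pvSegs_cons, ih]

lemma hyps2verses_alt_char (ids : List Int) (eos eot : Int) :
    hyps2verses_alt ids eos eot = pvTrimB (pvSplitE eos (ids.takeWhile (fun x => x != eot))) := by
  have hseq : PySem.List.slice ids (some 0) (some ((pvCutIdx eot ids : Nat) : Int))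
      = ids.takeWhile (fun x => x != eot) := by
    rw [PySem.List.slice_zero_start, PySem.List.slice_to_natCast, take_pvCutIdx]
  simp only [hyps2verses_alt, hseq, List.tail_cons]
  set seq := ids.takeWhile (fun x => x != eot) with hs
  rw [enum_filterMap_eq eos seq 0]
  have hcast : (pvPosN eos seq).map (fun k : Nat => (0 : Int) + (k : Int))
      = (pvPosN eos seq).map (fun k : Nat => (k : Int)) :=
    List.map_congr_left (fun k _ => by ring)
  rw [hcast]
  have hp := pairs_slice_eq_segs seq (pvPosN eos seq) 0
  rw [show (-1 : Int) = ((0 : Nat) : Int) - 1 by simp] at *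
  rw [hp, segs_eq_splitE, pvTrimB]

-- ===== VERDICT (by name: the statement is the Claim_ definition above) =====
theorem hyps2verses_spec : Claim_equal_hyps2verses := by
  intro ids eos eot _
  unfold Spec_hyps2verses
  rw [hyps2verses_char, hyps2verses_alt_char, pvTrimA_eq_pvTrimB]
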